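-- pv_equiv track=rewrite | github.com/pieteromt/aoc | 2015/day21/day21b.py | calc_all_props
-- ===== SOURCE A (Python) =====
-- def calc_props(cost, damage, armor, item):
--     cost   += item[1]
--     damage += item[2]
--     armor  += item[3]
--     return cost, damage, armor
--
-- def calc_all_props(weapons, armors, rings):
--     cost, damage, armor = 0,0,0
--     for w in weapons:
--         cost, damage, armor = calc_props(cost, damage, armor, w)
--     for a in armors:
--         cost, damage, armor = calc_props(cost, damage, armor, a)
--     for r in rings:
--         cost, damage, armor = calc_props(cost, damage, armor, r)
--     return cost, damage, armor
-- ===== SOURCE B (Python) =====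
-- def calc_all_props(weapons, armors, rings):
--     items = list(weapons) + list(armors) + list(rings)
--     cost = sum(i[1] for i in items)
--     damage = sum(i[2] for i in items)
--     armor = sum(i[3] for i in items)
--     return cost, damage, armor
-- ===== Notes on version B (the rewrite author's own statement) =====
-- stated objective: simpler
-- what changed: Replaces the calc_props helper and the single interleaved three-accumulator pass with one concatenated item list and three direct per-field sum() reductions.
import Mathlib
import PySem

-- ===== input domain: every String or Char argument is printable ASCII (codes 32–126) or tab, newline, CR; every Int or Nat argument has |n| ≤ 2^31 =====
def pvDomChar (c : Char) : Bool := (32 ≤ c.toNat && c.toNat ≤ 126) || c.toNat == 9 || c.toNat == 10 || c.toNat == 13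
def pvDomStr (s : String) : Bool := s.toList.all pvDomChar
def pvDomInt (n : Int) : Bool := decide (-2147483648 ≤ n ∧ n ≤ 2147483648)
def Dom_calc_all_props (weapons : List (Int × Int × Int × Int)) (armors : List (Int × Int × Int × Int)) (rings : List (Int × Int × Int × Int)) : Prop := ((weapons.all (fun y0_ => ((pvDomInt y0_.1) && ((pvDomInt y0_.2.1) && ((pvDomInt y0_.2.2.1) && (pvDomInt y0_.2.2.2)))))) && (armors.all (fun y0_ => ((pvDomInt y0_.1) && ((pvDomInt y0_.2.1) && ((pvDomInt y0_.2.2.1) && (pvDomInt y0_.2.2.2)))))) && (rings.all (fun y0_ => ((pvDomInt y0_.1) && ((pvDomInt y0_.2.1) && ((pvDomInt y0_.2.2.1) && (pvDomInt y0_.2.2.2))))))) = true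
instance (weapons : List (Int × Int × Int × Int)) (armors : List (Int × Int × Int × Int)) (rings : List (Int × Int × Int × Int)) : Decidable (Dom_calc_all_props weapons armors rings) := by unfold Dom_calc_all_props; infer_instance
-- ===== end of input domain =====

-- B replaces the calc_props accumulator-threading loops with one concatenated list and three per-field sums (simpler decomposition).


-- ===== PORT A =====
-- A-side helper: calc_props(cost, damage, armor, item)
def calc_props (cost damage armor : Int) (item : Int × Int × Int × Int) : Int × Int × Int :=
  (cost + item.2.1, damage + item.2.2.1, armor + item.2.2.2)

def calc_all_props (weapons : List (Int × Int × Int × Int)) (armors : List (Int × Int × Int × Int)) (rings : List (Int × Int × Int × Int)) : Int × Int × Int :=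
  let s0 : Int × Int × Int := (0, 0, 0)
  let s1 := weapons.foldl (fun s w => calc_props s.1 s.2.1 s.2.2 w) s0
  let s2 := armors.foldl (fun s a => calc_props s.1 s.2.1 s.2.2 a) s1
  let s3 := rings.foldl (fun s r => calc_props s.1 s.2.1 s.2.2 r) s2
  s3

-- ===== PORT B =====
-- B: concatenate once, then three direct per-field sums
def calc_all_props_alt (weapons : List (Int × Int × Int × Int)) (armors : List (Int × Int × Int × Int)) (rings : List (Int × Int × Int × Int)) : Int × Int × Int :=
  let items := weapons ++ armors ++ rings
  ((items.map (fun i => i.2.1)).sum, (items.map (fun i => i.2.2.1)).sum, (items.map (fun i => i.2.2.2)).sum)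

-- ===== PRECONDITION & SPEC =====
def Spec_calc_all_props (weapons : List (Int × Int × Int × Int)) (armors : List (Int × Int × Int × Int)) (rings : List (Int × Int × Int × Int)) (out : Int × Int × Int) : Prop := out = calc_all_props_alt weapons armors rings
instance (weapons : List (Int × Int × Int × Int)) (armors : List (Int × Int × Int × Int)) (rings : List (Int × Int × Int × Int)) (out : Int × Int × Int) : Decidable (Spec_calc_all_props weapons armors rings out) := by unfold Spec_calc_all_props; infer_instance

-- ===== CLAIM (what is proved, stated in full; the proofs are below) =====
def Claim_equal_calc_all_props : Prop := ∀ (weapons : List (Int × Int × Int × Int)) (armors : List (Int × Int × Int × Int)) (rings : List (Int × Int × Int × Int)), Dom_calc_all_props weapons armors rings → Spec_calc_all_props weapons armors rings (calc_all_props weapons armors rings)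

-- ===== LEMMAS AND PROOFS =====

-- ===== VERDICT (by name: the statement is the Claim_ definition above) =====
-- foldl over one list starting from s adds the per-field sums to s
theorem foldl_calc_props (xs : List (Int × Int × Int × Int)) (s : Int × Int × Int) :
    xs.foldl (fun s w => calc_props s.1 s.2.1 s.2.2 w) s =
      (s.1 + (xs.map (fun i => i.2.1)).sum,
       s.2.1 + (xs.map (fun i => i.2.2.1)).sum,
       s.2.2 + (xs.map (fun i => i.2.2.2)).sum) := by
  induction xs generalizing s with
  | nil => simp
  | cons x xs ih =>
      rw [List.foldl_cons, ih]
      simp [calc_props]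
      refine ⟨by ring, by ring, by ring⟩

theorem calc_all_props_spec : Claim_equal_calc_all_props := by
  intro weapons armors rings _
  unfold Spec_calc_all_props calc_all_props calc_all_props_alt
  simp [foldl_calc_props]
  refine ⟨by ring, by ring, by ring⟩
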